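-- pv_equiv track=rewrite | github.com/Surfing-Ninja/ASHWAM_PROJECT_INTERN | canary.py | check_contradictions_in_output
-- ===== SOURCE A (Python) =====
-- from typing import List, Dict, Any
-- from collections import defaultdict
--
-- def check_contradictions_in_output(predicted_items: List[Dict]) -> int:
--     """
--     Count contradictions where same evidence has conflicting polarities.
--
--     WHY ZERO TOLERANCE:
--     It is logically impossible for the same evidence to indicate both
--     presence and absence. Any contradiction is a critical logic error
--     that invalidates the parser's reliability.
--
--     Args:
--         predicted_items: List of items extracted by the parser.
--
--     Returns:
--         Number of contradictory evidence spans (should be 0).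
--     """
--     # Group items by evidence_span
--     evidence_groups = defaultdict(list)
--     for item in predicted_items:
--         evidence = item.get("evidence_span", "").strip().lower()
--         if evidence:
--             polarity = item.get("polarity", "").lower()
--             evidence_groups[evidence].append(polarity)
--
--     contradiction_count = 0
--     for evidence, polarities in evidence_groups.items():
--         polarity_set = set(polarities)
--
--         # Check for contradictory polarities
--         has_present = "present" in polarity_set or "positive" in polarity_set
--         has_absent = "absent" in polarity_set or "negative" in polarity_set
--
--         if has_present and has_absent:
--             contradiction_count += 1
--
--     return contradiction_count
-- ===== SOURCE B (Python) =====
-- def check_contradictions_in_output(predicted_items):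
--     """Single pass: per-span (has_present, has_absent, counted) flags, counting
--     a contradiction the moment a span has seen both polarities."""
--     state = {}
--     count = 0
--     for item in predicted_items:
--         ev = item.get("evidence_span", "").strip().lower()
--         if not ev:
--             continue
--         pol = item.get("polarity", "").lower()
--         hp, ha, counted = state.get(ev, (False, False, False))
--         hp = hp or pol in ("present", "positive")
--         ha = ha or pol in ("absent", "negative")
--         if hp and ha and not counted:
--             count += 1
--             counted = True
--         state[ev] = (hp, ha, counted)
--     return count
-- ===== Notes on version B (the rewrite author's own statement) =====
-- stated objective: alternative
-- what changed: Replaced A's two-phase build-all-polarity-groups-then-rescan with a single accumulating pass that keeps only (has_present, has_absent, counted) flags per span and increments the contradiction count the moment a span first shows both polarities, eliminating the second loop and the per-span polarity lists.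
import Mathlib
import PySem

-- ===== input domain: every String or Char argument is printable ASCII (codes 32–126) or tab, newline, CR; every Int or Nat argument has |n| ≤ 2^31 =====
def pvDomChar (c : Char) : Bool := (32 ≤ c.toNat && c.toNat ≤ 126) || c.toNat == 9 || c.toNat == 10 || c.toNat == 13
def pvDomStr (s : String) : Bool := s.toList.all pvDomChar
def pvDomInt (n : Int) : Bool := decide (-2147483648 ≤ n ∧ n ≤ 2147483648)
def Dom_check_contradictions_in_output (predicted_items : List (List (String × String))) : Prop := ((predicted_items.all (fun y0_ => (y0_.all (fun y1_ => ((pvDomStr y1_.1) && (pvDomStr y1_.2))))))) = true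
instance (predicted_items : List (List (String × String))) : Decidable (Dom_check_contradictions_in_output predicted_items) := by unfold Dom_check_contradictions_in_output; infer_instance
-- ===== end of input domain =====

-- ===== PORT A =====
-- B keeps O(1) flags per span in one pass instead of A's group-then-rescan (objective: alternative, same cost).
-- shared helpers: the Python expressions item.get("evidence_span","").strip().lower() and item.get("polarity","").lower()
def pvEv (item : List (String × String)) : String :=
  PySem.Str.lower (PySem.Str.strip ((PySem.Dict.mk item).getD "evidence_span" ""))
def pvPol (item : List (String × String)) : String :=
  PySem.Str.lower ((PySem.Dict.mk item).getD "polarity" "")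

-- A: first loop body (defaultdict(list): evidence_groups[evidence].append(polarity))
def pvGroupStep (d : PySem.Dict String (List String)) (item : List (String × String)) :
    PySem.Dict String (List String) :=
  let evidence := pvEv item
  if evidence ≠ "" then d.modify evidence [] (fun l => l ++ [pvPol item]) else d

-- A: second loop body over evidence_groups.items()
def pvCountStep (cc : Int) (kv : String × List String) : Int :=
  let polarity_set := PySem.Set.ofList kv.2
  let has_present := polarity_set.contains "present" || polarity_set.contains "positive"
  let has_absent := polarity_set.contains "absent" || polarity_set.contains "negative"
  if has_present && has_absent then cc + 1 else cc

def check_contradictions_in_output (predicted_items : List (List (String × String))) : Int :=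
  ((predicted_items.foldl pvGroupStep PySem.Dict.empty).items).foldl pvCountStep 0

-- ===== PORT B =====
-- B: single loop body; state = (dict span -> (has_present, has_absent, counted), running count)
def pvAltStep (st : PySem.Dict String (Bool × Bool × Bool) × Int) (item : List (String × String)) :
    PySem.Dict String (Bool × Bool × Bool) × Int :=
  let ev := pvEv item
  if ev = "" then st
  else
    let pol := pvPol item
    let f := st.1.getD ev (false, false, false)
    let hp := f.1 || (pol == "present" || pol == "positive")
    let ha := f.2.1 || (pol == "absent" || pol == "negative")
    if hp && ha && !f.2.2 then (st.1.insert ev (hp, ha, true), st.2 + 1)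
    else (st.1.insert ev (hp, ha, f.2.2), st.2)

def check_contradictions_in_output_alt (predicted_items : List (List (String × String))) : Int :=
  (predicted_items.foldl pvAltStep (PySem.Dict.empty, 0)).2

-- ===== PRECONDITION & SPEC =====
def Spec_check_contradictions_in_output (predicted_items : List (List (String × String))) (out : Int) : Prop := out = check_contradictions_in_output_alt predicted_items
instance (predicted_items : List (List (String × String))) (out : Int) : Decidable (Spec_check_contradictions_in_output predicted_items out) := by unfold Spec_check_contradictions_in_output; infer_instance

-- ===== CLAIM (what is proved, stated in full; the proofs are below) =====
def Claim_equal_check_contradictions_in_output : Prop := ∀ (predicted_items : List (List (String × String))), Dom_check_contradictions_in_output predicted_items → Spec_check_contradictions_in_output predicted_items (check_contradictions_in_output predicted_items)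

-- ===== LEMMAS AND PROOFS =====
def pvHasP (l : List String) : Bool := l.contains "present" || l.contains "positive"
def pvHasA (l : List String) : Bool := l.contains "absent" || l.contains "negative"
def pvFlag (l : List String) : Bool × Bool × Bool := (pvHasP l, pvHasA l, pvHasP l && pvHasA l)
def pvFm (kv : String × List String) : String × (Bool × Bool × Bool) := (kv.1, pvFlag kv.2)
def pvCnt (l : List (String × List String)) : Int := (l.countP (fun kv => pvHasP kv.2 && pvHasA kv.2) : Int)

-- invariant tying A's group dict to B's (flags dict, count) state
def pvInv (dA : PySem.Dict String (List String)) (st : PySem.Dict String (Bool × Bool × Bool) × Int) : Prop :=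
  st.1.items = dA.items.map pvFm ∧ (dA.items.map (·.1)).Nodup ∧ st.2 = pvCnt dA.items

lemma pvHasP_append (l : List String) (p : String) :
    pvHasP (l ++ [p]) = (pvHasP l || (p == "present" || p == "positive")) := by
  simp [pvHasP, Bool.or_comm, Bool.or_assoc, Bool.or_left_comm, eq_comm, Bool.beq_eq_decide_eq]

lemma pvHasA_append (l : List String) (p : String) :
    pvHasA (l ++ [p]) = (pvHasA l || (p == "absent" || p == "negative")) := by
  simp [pvHasA, Bool.or_comm, Bool.or_assoc, Bool.or_left_comm, eq_comm, Bool.beq_eq_decide_eq]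

-- A's set-membership test equals the plain list test
lemma pvCountStep_eq (cc : Int) (kv : String × List String) :
    pvCountStep cc kv = (if pvHasP kv.2 && pvHasA kv.2 then cc + 1 else cc) := by
  simp [pvCountStep, pvHasP, pvHasA, PySem.Set.mem_ofList]

lemma pvCount_loop (l : List (String × List String)) (c : Int) :
    l.foldl pvCountStep c = c + pvCnt l := by
  induction l generalizing c with
  | nil => simp [pvCnt]
  | cons x xs ih =>
    rw [List.foldl_cons, pvCountStep_eq, ih]
    simp only [pvCnt, List.countP_cons]
    split_ifs <;> push_cast <;> ring

-- updating the unique entry at key ev: effect on the mapped items and on the count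
lemma pvUpdate (l : List (String × List String)) (ev pol : String) (old : List String)
    (hnd : (l.map (·.1)).Nodup) (hf : l.find? (fun p => p.1 == ev) = some (ev, old)) :
    ((l.map (fun p => if p.1 == ev then (ev, old ++ [pol]) else p)).map pvFm
      = (l.map pvFm).map (fun p => if p.1 == ev then (ev, pvFlag (old ++ [pol])) else p))
    ∧ (pvCnt (l.map (fun p => if p.1 == ev then (ev, old ++ [pol]) else p))
      = pvCnt l + (if pvHasP (old ++ [pol]) && pvHasA (old ++ [pol]) then 1 else 0)
              - (if pvHasP old && pvHasA old then 1 else 0))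
    ∧ ((l.map (fun p => if p.1 == ev then (ev, old ++ [pol]) else p)).map (·.1) = l.map (·.1)) := by
  induction l with
  | nil => simp at hf
  | cons x xs ih =>
    simp only [List.map_cons, List.nodup_cons, List.mem_map] at hnd
    by_cases hx : (x.1 == ev) = true
    · simp only [List.find?_cons, hx] at hf
      have hx2 : x = (ev, old) := by simpa using hf
      subst hx2
      have hni : ∀ p ∈ xs, (p.1 == ev) = false := by
        intro p hp
        simp only [Bool.eq_false_iff, ne_eq, beq_iff_eq]
        exact fun h => hnd.1 ⟨p, hp, h⟩
      have hid : List.map (fun p => if (p.1 == ev) = true then (ev, old ++ [pol]) else p) xs = xs := by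
        calc List.map (fun p => if (p.1 == ev) = true then (ev, old ++ [pol]) else p) xs
            = List.map id xs := List.map_congr_left (fun p hp => by simp [hni p hp])
          _ = xs := List.map_id xs
      have hid2 : (xs.map pvFm).map (fun p => if p.1 == ev then (ev, pvFlag (old ++ [pol])) else p) = xs.map pvFm := by
        rw [List.map_map]
        refine List.map_congr_left (fun p hp => ?_)
        simp [Function.comp, pvFm, hni p hp]
      refine ⟨?_, ?_, ?_⟩
      · simp only [List.map_cons, if_pos hx, hid, hid2]
        simp [pvFm]
      · simp only [List.map_cons, if_pos hx, hid, pvCnt, List.countP_cons]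
        split_ifs <;> simp_all
      · simp only [List.map_cons, if_pos hx, hid]
    · have hxf : (x.1 == ev) = false := by simpa using hx
      simp only [List.find?_cons, hxf] at hf
      obtain ⟨h1, h2, h3⟩ := ih hnd.2 hf
      refine ⟨?_, ?_, ?_⟩
      · simp only [List.map_cons, if_neg hx, h1]
        rw [if_neg (by simp [pvFm, hxf])]
      · simp only [pvCnt, List.countP_cons, List.map_cons, if_neg hx] 
        simp only [pvCnt] at h2
        push_cast at h2 ⊢
        split_ifs at h2 ⊢ <;> omega
      · simp only [List.map_cons, if_neg hx, h3]

lemma pvStep (dA : PySem.Dict String (List String)) (st : PySem.Dict String (Bool × Bool × Bool) × Int)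
    (item : List (String × String)) (h : pvInv dA st) :
    pvInv (pvGroupStep dA item) (pvAltStep st item) := by
  obtain ⟨h1, h2, h3⟩ := h
  unfold pvInv
  by_cases he : pvEv item = ""
  · rw [pvGroupStep, pvAltStep]
    simp only [he, ite_not]
    exact ⟨h1, h2, h3⟩
  · rw [pvGroupStep, pvAltStep]
    simp only [if_neg he, if_pos he, ne_eq]
    by_cases hc : dA.contains (pvEv item) = true
    · obtain ⟨pr, hpr⟩ : ∃ pr, dA.items.find? (fun p => p.1 == pvEv item) = some pr := by
        rw [PySem.Dict.contains] at hc
        rcases List.any_eq_true.mp hc with ⟨x, hx, hpx⟩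
        exact Option.isSome_iff_exists.mp (List.find?_isSome.mpr ⟨x, hx, hpx⟩)
      have hpr1 : pr.1 = pvEv item := by simpa using List.find?_some hpr
      have hf : dA.items.find? (fun p => p.1 == pvEv item) = some (pvEv item, pr.2) := by
        rw [hpr]; cases pr; simp_all
      have hget : dA.getD (pvEv item) [] = pr.2 := by
        simp [PySem.Dict.getD, PySem.Dict.get?, hf]
      have hgetB : st.1.getD (pvEv item) (false, false, false) = pvFlag pr.2 := by
        simp only [PySem.Dict.getD, PySem.Dict.get?, h1, List.find?_map]
        have hcomp : ((fun p : String × (Bool × Bool × Bool) => p.1 == pvEv item) ∘ pvFm)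
            = (fun p : String × List String => p.1 == pvEv item) := rfl
        rw [hcomp, hf]; rfl
      have hcB : st.1.contains (pvEv item) = true := by
        rw [PySem.Dict.contains, h1]
        rw [PySem.Dict.contains] at hc
        simpa [List.any_map, Function.comp_def, pvFm] using hc
      obtain ⟨u1, u2, u3⟩ := pvUpdate dA.items (pvEv item) (pvPol item) pr.2 h2 hf
      have hA : dA.modify (pvEv item) [] (fun l => l ++ [pvPol item]) =
          PySem.Dict.mk (dA.items.map (fun p => if p.1 == pvEv item then (pvEv item, pr.2 ++ [pvPol item]) else p)) := by
        rw [PySem.Dict.modify, hget, PySem.Dict.insert, if_pos hc]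
      have hB : ∀ v : Bool × Bool × Bool, st.1.insert (pvEv item) v =
          PySem.Dict.mk ((dA.items.map pvFm).map (fun p => if p.1 == pvEv item then (pvEv item, v) else p)) := by
        intro v
        rw [PySem.Dict.insert, if_pos hcB, h1]
      have ehp := pvHasP_append pr.2 (pvPol item)
      have eha := pvHasA_append pr.2 (pvPol item)
      simp only [hgetB, pvFlag, hA, hB]
      split_ifs with hb
      · refine ⟨?_, by rw [u3]; exact h2, ?_⟩
        · rw [u1]
          have : (pvHasP pr.2 || (pvPol item == "present" || pvPol item == "positive"),
                  pvHasA pr.2 || (pvPol item == "absent" || pvPol item == "negative"), true)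
              = pvFlag (pr.2 ++ [pvPol item]) := by
            simp only [pvFlag, ehp, eha]
            simp only [Bool.and_eq_true, Bool.not_eq_true', Bool.and_eq_false_iff] at hb
            simp [hb.1.1, hb.1.2]
          rw [this]
        · simp only [u2, ← h3]
          simp only [Bool.and_eq_true, Bool.not_eq_true', Bool.and_eq_false_iff] at hb
          rw [← ehp, ← eha] at hb
          simp only [hb.1.1, hb.1.2]
          rcases hb.2 with h | h <;> simp [h]
      · refine ⟨?_, by rw [u3]; exact h2, ?_⟩
        · rw [u1]
          have : (pvHasP pr.2 || (pvPol item == "present" || pvPol item == "positive"),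
                  pvHasA pr.2 || (pvPol item == "absent" || pvPol item == "negative"),
                  pvHasP pr.2 && pvHasA pr.2)
              = pvFlag (pr.2 ++ [pvPol item]) := by
            simp only [pvFlag, ehp, eha]
            cases hP : pvHasP pr.2 <;> cases hQ : pvHasA pr.2 <;> simp_all
          rw [this]
        · simp only [u2, ← h3]
          rw [← ehp, ← eha] at hb
          cases hP : pvHasP pr.2 <;> cases hQ : pvHasA pr.2 <;>
            simp_all [pvHasP_append, pvHasA_append]
    · have hne : ∀ p ∈ dA.items, ((p.1 == pvEv item) = false) := by
        intro p hp
        by_contra hh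
        exact hc (List.any_eq_true.mpr ⟨p, hp, by simpa using hh⟩)
      have hfn : dA.items.find? (fun p => p.1 == pvEv item) = none :=
        List.find?_eq_none.mpr (fun p hp => by simp [hne p hp])
      have hget : dA.getD (pvEv item) [] = [] := by
        simp [PySem.Dict.getD, PySem.Dict.get?, hfn]
      have hcB : ¬ st.1.contains (pvEv item) = true := by
        rw [PySem.Dict.contains, h1]
        intro hh
        rcases List.any_eq_true.mp hh with ⟨x, hx, hpx⟩
        rcases List.mem_map.mp hx with ⟨q, hq, rfl⟩
        exact absurd hpx (by simp [pvFm, hne q hq])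
      have hgetB : st.1.getD (pvEv item) (false, false, false) = (false, false, false) := by
        have : st.1.items.find? (fun p => p.1 == pvEv item) = none := by
          rw [h1, List.find?_map]
          have hcomp : ((fun p : String × (Bool × Bool × Bool) => p.1 == pvEv item) ∘ pvFm)
              = (fun p : String × List String => p.1 == pvEv item) := rfl
          rw [hcomp, hfn]; rfl
        simp [PySem.Dict.getD, PySem.Dict.get?, this]
      have hA : dA.modify (pvEv item) [] (fun l => l ++ [pvPol item]) =
          PySem.Dict.mk (dA.items ++ [(pvEv item, [] ++ [pvPol item])]) := by
        rw [PySem.Dict.modify, hget, PySem.Dict.insert, if_neg hc]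
      have hB : ∀ v : Bool × Bool × Bool, st.1.insert (pvEv item) v =
          PySem.Dict.mk (dA.items.map pvFm ++ [(pvEv item, v)]) := by
        intro v
        rw [PySem.Dict.insert, if_neg hcB, h1]
      have hmp : pvHasP [pvPol item] = (pvPol item == "present" || pvPol item == "positive") := by
        simpa [pvHasP] using pvHasP_append [] (pvPol item)
      have hma : pvHasA [pvPol item] = (pvPol item == "absent" || pvPol item == "negative") := by
        simpa [pvHasA] using pvHasA_append [] (pvPol item)
      have hnd : (((dA.items ++ [(pvEv item, [] ++ [pvPol item])]) : List (String × List String)).map (·.1)).Nodup := by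
        simp only [List.map_append, List.map_cons, List.map_nil, List.nil_append]
        refine List.Nodup.append h2 (List.nodup_singleton _) ?_
        intro a ha hb
        rcases List.mem_map.mp ha with ⟨q, hq, rfl⟩
        have := hne q hq
        simp only [List.mem_singleton] at hb
        simp [hb] at this
      have hcnt : pvCnt (dA.items ++ [(pvEv item, [] ++ [pvPol item])]) =
          pvCnt dA.items + (if pvHasP [pvPol item] && pvHasA [pvPol item] then 1 else 0) := by
        simp only [pvCnt, List.countP_append, List.countP_cons, List.countP_nil, List.nil_append]
        split_ifs <;> simp_all
      simp only [hgetB, hA, hB, Bool.false_or, Bool.not_false, Bool.and_true]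
      split_ifs with hb
      · refine ⟨?_, hnd, ?_⟩
        · simp only [List.map_append, List.map_cons, List.map_nil, List.nil_append, pvFm, pvFlag, hmp, hma, hb]
        · rw [hcnt, ← h3, hmp, hma, hb]
          simp
      · refine ⟨?_, hnd, ?_⟩
        · have hbf : ((pvPol item == "present" || pvPol item == "positive")
              && (pvPol item == "absent" || pvPol item == "negative")) = false :=
            Bool.eq_false_iff.mpr hb
          simp only [List.map_append, List.map_cons, List.map_nil, List.nil_append, pvFm, pvFlag, hmp, hma, hbf]
        · rw [hcnt, ← h3, hmp, hma]
          simp only [Bool.and_eq_true] at hb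
          rw [if_neg (by simpa using hb)]
          simp

lemma pvFold (l : List (List (String × String))) (dA : PySem.Dict String (List String))
    (st : PySem.Dict String (Bool × Bool × Bool) × Int) (h : pvInv dA st) :
    pvInv (l.foldl pvGroupStep dA) (l.foldl pvAltStep st) := by
  induction l generalizing dA st with
  | nil => exact h
  | cons x xs ih =>
    rw [List.foldl_cons, List.foldl_cons]
    exact ih (pvGroupStep dA x) (pvAltStep st x) (pvStep dA st x h)

-- ===== VERDICT (by name: the statement is the Claim_ definition above) =====
theorem check_contradictions_in_output_spec : Claim_equal_check_contradictions_in_output := by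
  intro l _
  have h := pvFold l PySem.Dict.empty (PySem.Dict.empty, 0) ⟨rfl, List.nodup_nil, rfl⟩
  show check_contradictions_in_output l = check_contradictions_in_output_alt l
  rw [check_contradictions_in_output, check_contradictions_in_output_alt, pvCount_loop, h.2.2]
  simp
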